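-- pv_equiv track=rewrite | github.com/jsrimr/ProblemSolving | 네이버신입/성냥개비.py | solution
-- ===== SOURCE A (Python) =====
-- from itertools import combinations_with_replacement, permutations
--
-- def solution(k):
--     sticks = {0: 6, 1: 2, 2: 5, 3: 5, 4: 4, 5: 5, 6: 6, 7: 3, 8: 7, 9: 6}
--     all_combinations = []
--     for i in range(10):
--         all_combinations.extend(list(combinations_with_replacement(range(10), i)))
--
--     possible_comb = []
--     for comb in all_combinations:
--         n_stick_list = [sticks[el] for el in comb]
--         if sum(n_stick_list) == k:
--             possible_comb.append(comb)
--
--     result = 0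
--     for comb in possible_comb:
--         for tup in set(permutations(comb, len(comb))):  # 0으로 시작하는 거 제거
--             if tup[0] != 0:
--                 result += 1
--             if len(tup) == 1 and tup[0] == 0: #0만 예외
--                 result += 1
--
--     return result
-- ===== SOURCE B (Python) =====
-- def solution(k):
--     sticks = [6, 2, 5, 5, 4, 5, 6, 3, 7, 6]
--     if k < 2 or k > 63:
--         return 0
--     # g[c] = number of digit strings of the current length with total stick cost c
--     g = [1] + [0] * 63
--     rows = []
--     for _ in range(9):  # suffix lengths 0..8 (numbers have 1..9 digits)
--         rows.append(g)
--         g = [sum(g[c - s] for s in sticks if c - s >= 0) for c in range(64)]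
--     total = sum(row[k - sticks[d]]
--                 for row in rows for d in range(1, 10) if k - sticks[d] >= 0)
--     return total + (1 if k == 6 else 0)  # the single number 0
-- ===== Notes on version B (the rewrite author's own statement) =====
-- stated objective: faster
-- what changed: replaces the enumeration of all digit multisets and the factorial set-of-permutations dedup per multiset with a dynamic program counting digit strings of length 1..9 by exact matchstick cost (nonzero leading digit, plus the single number 0 at cost 6)
-- outside the precondition, e.g. on solution(0): A raises IndexError, B returns 0
import Mathlib
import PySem

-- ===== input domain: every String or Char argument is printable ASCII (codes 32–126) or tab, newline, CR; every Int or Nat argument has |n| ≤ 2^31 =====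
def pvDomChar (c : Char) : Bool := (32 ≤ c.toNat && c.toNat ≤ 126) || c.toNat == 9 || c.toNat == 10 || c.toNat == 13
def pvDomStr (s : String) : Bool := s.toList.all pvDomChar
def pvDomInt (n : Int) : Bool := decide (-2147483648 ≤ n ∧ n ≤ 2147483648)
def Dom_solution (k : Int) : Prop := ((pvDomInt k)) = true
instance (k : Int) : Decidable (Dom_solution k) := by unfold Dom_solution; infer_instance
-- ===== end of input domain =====

-- B replaces A's enumeration of digit multisets with deduplicated permutations by a DP over
-- (number length ≤ 9, matchstick cost ≤ 63): faster (asymptotic).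

-- ===== PORT A =====
-- the sticks dict; its keys cover every digit looked up, so the lookup is ported with getD 0
def pvSticksA : PySem.Dict Int Int :=
  PySem.Dict.ofList [(0, 6), (1, 2), (2, 5), (3, 5), (4, 4), (5, 5), (6, 6), (7, 3), (8, 7), (9, 6)]

-- itertools.combinations_with_replacement(pool, n), hand port (exact, lexicographic order)
def pvCWR : List Int → Nat → List (List Int)
  | _, 0 => [[]]
  | [], _ + 1 => []
  | x :: xs, n + 1 => (pvCWR (x :: xs) n).map (fun t => x :: t) ++ pvCWR xs (n + 1)
termination_by l n => (n, l.length)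

def solution (k : Int) : Int :=
  let pool := PySem.List.pyRange 0 10 1
  -- for i in range(10): all_combinations.extend(...); i is a nonnegative Int, hence .toNat
  let allCombinations := (PySem.List.pyRange 0 10 1).foldl
    (fun acc i => acc ++ pvCWR pool i.toNat) []
  let possible := allCombinations.foldl
    (fun acc comb =>
      if (comb.map (fun el => PySem.Dict.getD pvSticksA el 0)).sum = k
      then acc ++ [comb] else acc) []
  -- tup[0] ported with pyGet?; on the empty tuple Python raises IndexError (excluded by Pre_)
  possible.foldl (fun result comb =>
    (PySem.Set.ofList (PySem.List.permutations comb comb.length)).foldl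
      (fun r tup =>
        let r := if PySem.List.pyGet? tup 0 ≠ some 0 then r + 1 else r
        if tup.length = 1 ∧ PySem.List.pyGet? tup 0 = some 0 then r + 1 else r)
      result) 0

-- ===== PORT B =====
def pvSticksB : List Int := [6, 2, 5, 5, 4, 5, 6, 3, 7, 6]

-- list indices in B are always in range; indexing is ported with getD 0
def pvStep (g : List Int) : List Int :=
  (List.range 64).map (fun c : Nat =>
    (pvSticksB.filterMap (fun s =>
      if 0 ≤ (c : Int) - s then some (g.getD ((c : Int) - s).toNat 0) else none)).sum)

def solution_alt (k : Int) : Int :=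
  if k < 2 ∨ 63 < k then 0
  else
    let g0 : List Int := 1 :: List.replicate 63 0
    let st := (List.range 9).foldl
      (fun (st : List (List Int) × List Int) _ => (st.1 ++ [st.2], pvStep st.2)) ([], g0)
    let total := (st.1.map (fun row =>
      ((PySem.List.pyRange 1 10 1).filterMap (fun d =>
        let r := k - pvSticksB.getD d.toNat 0
        if 0 ≤ r then some (row.getD r.toNat 0) else none)).sum)).sum
    total + (if k = 6 then 1 else 0)

-- ===== PRECONDITION & SPEC =====
-- Pre_ excludes exactly k = 0: there the empty combination survives the sum filter and
-- Python evaluates tup[0] on the empty tuple, raising IndexError.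
def Pre_solution (k : Int) : Prop := k ≠ 0
instance (k : Int) : Decidable (Pre_solution k) := by unfold Pre_solution; infer_instance
def pvWitness_solution : Int := (5)

def Spec_solution (k : Int) (out : Int) : Prop := out = solution_alt k
instance (k : Int) (out : Int) : Decidable (Spec_solution k out) := by unfold Spec_solution; infer_instance

-- ===== CLAIM (what is proved, stated in full; the proofs are below) =====
def Claim_equal_solution : Prop := ∀ (k : Int), Dom_solution k → Pre_solution k → Spec_solution k (solution k)


-- ===== LEMMAS AND PROOFS =====

-- ---- basic objects used by the proofs ----
def pvStick (d : Int) : Int := PySem.Dict.getD pvSticksA d 0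
def pvCost (l : List Int) : Int := (l.map (fun el => PySem.Dict.getD pvSticksA el 0)).sum
def pvDigits : List Int := PySem.List.pyRange 0 10 1
-- all digit strings of length n
def pvAll : Nat → List (List Int)
  | 0 => [[]]
  | n + 1 => pvDigits.flatMap (fun d => (pvAll n).map (fun t => d :: t))
-- the weight A's inner loop adds for one deduplicated tuple
def pvW (t : List Int) : Int :=
  (if PySem.List.pyGet? t 0 ≠ some 0 then 1 else 0) +
  (if t.length = 1 ∧ PySem.List.pyGet? t 0 = some 0 then 1 else 0)
def pvSortb (t : List Int) : List Int := t.mergeSort (fun a b : Int => a ≤ b)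
def pvM (n : Nat) (c : Int) : Int := (((pvAll n).filter (fun s => decide (pvCost s = c))).length : Int)
def pvN (n : Nat) (k : Int) : Int := ((((pvAll n).filter (fun s => decide (pvCost s = k))).map pvW).sum)
def pvWD (c : List Int) : Int := ((PySem.Set.ofList (PySem.List.permutations c c.length)).map pvW).sum

-- ---- generic list-sum helpers ----
theorem pv_sum_map_ite_filter {a : Type} (T : List a) (p : a → Bool) (g : a → Int) :
    ((T.filter p).map g).sum = (T.map (fun t => if p t then g t else 0)).sum := by
  induction T with
  | nil => rfl
  | cons x T ih =>
    by_cases h : p x <;> simp [List.filter_cons, h, ih]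

theorem pv_sum_filterMap {a : Type} (l : List a) (p : a → Prop) [DecidablePred p] (f : a → Int) :
    (l.filterMap (fun x => if p x then some (f x) else none)).sum
      = (l.map (fun x => if p x then f x else 0)).sum := by
  induction l with
  | nil => rfl
  | cons x l ih =>
    by_cases h : p x <;> simp [List.filterMap_cons, h, ih]

theorem pv_part1 (C T : List (List Int)) (f : List Int → List Int) (g : List Int → Int) :
    (C.map (fun c => ((T.filter (fun t => f t == c)).map g).sum)).sum
      = (T.map (fun t => (C.count (f t) : Int) * g t)).sum := by
  induction C with
  | nil => simp
  | cons c C ih =>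
    simp only [List.map_cons, List.sum_cons, ih, List.count_cons]
    rw [pv_sum_map_ite_filter]
    rw [← PySem.List.sum_map_add_int]
    congr 1
    apply List.map_congr_left
    intro t _
    by_cases h : f t = c
    · subst h
      simp
      push_cast
      ring
    · have h1 : (f t == c) = false := by simp [h]
      have h2 : (c == f t) = false := by simp; intro e; exact h e.symm
      simp [h1, h2]

-- ---- permutations: full membership characterisation ----
theorem pv_permutations_succ (xs : List Int) (r : Nat) : PySem.List.permutations xs (r+1) =
    (List.range xs.length).flatMap (fun i =>
      match xs[i]? with
      | none => []
      | some x => (PySem.List.permutations (xs.eraseIdx i) r).map (fun p => x :: p)) := by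
  rw [PySem.List.permutations]
  congr 1
  funext i
  cases h : xs[i]? <;> simp

theorem pv_mem_permutations (xs t : List Int) :
    t ∈ PySem.List.permutations xs xs.length ↔ t.Perm xs := by
  constructor
  · exact PySem.List.perm_of_mem_permutations
  · intro hp
    induction t generalizing xs with
    | nil =>
      have : xs = [] := (List.Perm.nil_eq hp).symm
      subst this; simp [PySem.List.permutations]
    | cons a t ih =>
      have ha : a ∈ xs := hp.mem_iff.mp (List.mem_cons_self)
      obtain ⟨i, hi, hxi⟩ := List.mem_iff_getElem.mp ha
      have hlen : xs.length = t.length + 1 := by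
        have := hp.length_eq; simpa using this.symm
      rw [hlen, pv_permutations_succ]
      refine List.mem_flatMap.mpr ⟨i, List.mem_range.mpr (by omega), ?_⟩
      have hget : xs[i]? = some a := by rw [List.getElem?_eq_getElem hi, hxi]
      rw [hget]
      simp only [List.mem_map]
      refine ⟨t, ?_, rfl⟩
      have hperm2 : xs.Perm (a :: xs.eraseIdx i) := by
        have h3 := (List.getElem_cons_eraseIdx_perm hi).symm
        rwa [hxi] at h3
      have ht : t.Perm (xs.eraseIdx i) := ((hp.trans hperm2).cons_inv)
      have hle : (xs.eraseIdx i).length = t.length := by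
        rw [List.length_eraseIdx]; simp [hi]; omega
      have := ih (xs.eraseIdx i) ht
      rwa [hle] at this

-- ---- pvAll: membership and nodup ----
theorem pv_mem_pvAll (n : Nat) (t : List Int) :
    t ∈ pvAll n ↔ t.length = n ∧ ∀ a ∈ t, 0 ≤ a ∧ a < 10 := by
  induction n generalizing t with
  | zero =>
    simp only [pvAll]
    constructor
    · rintro h; simp at h; subst h; simp
    · rintro ⟨h, _⟩; simp [List.eq_nil_of_length_eq_zero h]
  | succ n ih =>
    simp only [pvAll, List.mem_flatMap, List.mem_map]
    constructor
    · rintro ⟨d, hd, s, hs, rfl⟩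
      obtain ⟨hlen, hel⟩ := (ih s).mp hs
      have hd' := PySem.List.mem_pyRange_one.mp hd
      refine ⟨by simp [hlen], ?_⟩
      intro a ha
      rcases List.mem_cons.mp ha with rfl | ha
      · exact hd'
      · exact hel a ha
    · rintro ⟨hlen, hel⟩
      cases t with
      | nil => simp at hlen
      | cons d s =>
        refine ⟨d, ?_, s, (ih s).mpr ⟨by simpa using hlen, fun a ha => hel a (List.mem_cons_of_mem _ ha)⟩, rfl⟩
        exact PySem.List.mem_pyRange_one.mpr (hel d List.mem_cons_self)

theorem pv_nodup_pvAll (n : Nat) : (pvAll n).Nodup := by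
  induction n with
  | zero => simp [pvAll]
  | succ n ih =>
    simp only [pvAll]
    rw [List.nodup_flatMap]
    constructor
    · intro d _
      exact ih.map (fun a b h => by simpa using h)
    · have hnd : pvDigits.Nodup := by decide
      refine (List.Pairwise.imp ?_ hnd)
      intro d e hde
      intro t ht ht'
      simp only [List.mem_map] at ht ht'
      obtain ⟨s, _, rfl⟩ := ht
      obtain ⟨s', _, h⟩ := ht'
      exact hde (by simpa using (List.cons.injEq ..).mp h.symm |>.1)

-- ---- pvCWR: membership and nodup over a strictly increasing pool ----
theorem pv_mem_pvCWR (pool : List Int) (n : Nat) (t : List Int) (hp : pool.Pairwise (· < ·)) :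
    t ∈ pvCWR pool n ↔ t.length = n ∧ t.Pairwise (· ≤ ·) ∧ ∀ x ∈ t, x ∈ pool := by
  induction pool, n using pvCWR.induct generalizing t with
  | case1 pool =>
    simp only [pvCWR]
    constructor
    · rintro h; simp at h; subst h; simp
    · rintro ⟨h, _⟩; simp [List.eq_nil_of_length_eq_zero h]
  | case2 n =>
    simp only [pvCWR]
    constructor
    · intro h; simp at h
    · rintro ⟨hlen, _, hmem⟩
      cases t with
      | nil => simp at hlen
      | cons y t' => exact absurd (hmem y List.mem_cons_self) (by simp)
  | case3 x xs n ih1 ih2 =>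
    have hx_lt : ∀ y ∈ xs, x < y := (List.pairwise_cons.mp hp).1
    have hp' : xs.Pairwise (· < ·) := (List.pairwise_cons.mp hp).2
    simp only [pvCWR, List.mem_append, List.mem_map]
    constructor
    · rintro (⟨t', ht', rfl⟩ | ht)
      · obtain ⟨hlen, hsort, hmem⟩ := (ih1 t' hp).mp ht'
        refine ⟨by simp [hlen], ?_, ?_⟩
        · rw [List.pairwise_cons]
          refine ⟨?_, hsort⟩
          intro y hy
          rcases List.mem_cons.mp (hmem y hy) with rfl | hyxs
          · exact le_refl _
          · exact le_of_lt (hx_lt y hyxs)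
        · intro z hz
          rcases List.mem_cons.mp hz with rfl | hz'
          · exact List.mem_cons_self
          · exact hmem z hz'
      · obtain ⟨hlen, hsort, hmem⟩ := (ih2 t hp').mp ht
        exact ⟨hlen, hsort, fun z hz => List.mem_cons_of_mem _ (hmem z hz)⟩
    · rintro ⟨hlen, hsort, hmem⟩
      cases t with
      | nil => simp at hlen
      | cons y t' =>
        rcases List.mem_cons.mp (hmem y List.mem_cons_self) with rfl | hyxs
        · left
          refine ⟨t', (ih1 t' hp).mpr ⟨by simpa using hlen, (List.pairwise_cons.mp hsort).2, ?_⟩, rfl⟩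
          intro z hz
          exact hmem z (List.mem_cons_of_mem _ hz)
        · right
          refine (ih2 (y :: t') hp').mpr ⟨hlen, hsort, ?_⟩
          intro z hz
          rcases List.mem_cons.mp hz with rfl | hz'
          · exact hyxs
          · rcases List.mem_cons.mp (hmem z (List.mem_cons_of_mem _ hz')) with rfl | hzxs
            · exact absurd ((List.pairwise_cons.mp hsort).1 z hz') (not_le.mpr (hx_lt y hyxs))
            · exact hzxs

theorem pv_nodup_pvCWR (pool : List Int) (n : Nat) (hp : pool.Pairwise (· < ·)) :
    (pvCWR pool n).Nodup := by
  induction pool, n using pvCWR.induct with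
  | case1 pool => simp [pvCWR]
  | case2 n => simp [pvCWR]
  | case3 x xs n ih1 ih2 =>
    have hx_lt : ∀ y ∈ xs, x < y := (List.pairwise_cons.mp hp).1
    have hp' : xs.Pairwise (· < ·) := (List.pairwise_cons.mp hp).2
    simp only [pvCWR]
    rw [List.nodup_append]
    refine ⟨(ih1 hp).map (fun a b h => by simpa using h), ih2 hp', ?_⟩
    intro t ht u hu
    simp only [List.mem_map] at ht
    obtain ⟨t', ht1, heq⟩ := ht
    subst heq
    obtain ⟨hlen, hs2, hmem⟩ := (pv_mem_pvCWR xs (n+1) u hp').mp hu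
    intro heq2
    subst heq2
    exact absurd (hx_lt x (hmem x List.mem_cons_self)) (lt_irrefl x)

-- ---- cost facts ----
theorem pv_cost_perm {t c : List Int} (h : t.Perm c) : pvCost t = pvCost c :=
  (h.map _).sum_eq

theorem pv_stick_bounds (d : Int) (h1 : 0 ≤ d) (h2 : d < 10) :
    2 ≤ pvStick d ∧ pvStick d ≤ 7 := by
  interval_cases d <;> decide

theorem pv_cost_bounds_list : ∀ (t : List Int), (∀ a ∈ t, 0 ≤ a ∧ a < 10) →
    2 * (t.length : Int) ≤ pvCost t ∧ pvCost t ≤ 7 * (t.length : Int) := by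
  intro t
  induction t with
  | nil => intro _; simp [pvCost]
  | cons a t ih =>
    intro hel
    have ha := hel a List.mem_cons_self
    have hb := pv_stick_bounds a ha.1 ha.2
    have iht := ih (fun z hz => hel z (List.mem_cons_of_mem _ hz))
    simp only [pvCost, List.map_cons, List.sum_cons, List.length_cons] at *
    simp only [pvStick] at hb
    push_cast
    constructor <;> omega

theorem pv_cost_bounds (n : Nat) (t : List Int) (ht : t ∈ pvAll n) :
    2 * (n : Int) ≤ pvCost t ∧ pvCost t ≤ 7 * (n : Int) := by
  obtain ⟨hlen, hel⟩ := (pv_mem_pvAll n t).mp ht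
  have := pv_cost_bounds_list t hel
  rw [hlen] at this
  exact this

-- sum over a flatMap
theorem pv_sum_flatMap {a : Type} (l : List a) (f : a → List Int) :
    (l.flatMap f).sum = (l.map (fun x => (f x).sum)).sum := by
  induction l with
  | nil => rfl
  | cons x l ih => simp [List.flatMap_cons, ih]

-- mergeSort facts specialised to Int
theorem pv_sortb_perm (t : List Int) : (pvSortb t).Perm t := List.mergeSort_perm t _

theorem pv_sortb_pairwise (t : List Int) : (pvSortb t).Pairwise (· ≤ ·) := by
  have h := List.sorted_mergeSort (le := fun a b : Int => a ≤ b)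
    (by intro a b c; simp; omega) (by intro a b; simp; omega) t
  exact h.imp (by simp)

theorem pv_sortb_eq {t c : List Int} (hperm : t.Perm c) (hc : c.Pairwise (· ≤ ·)) :
    pvSortb t = c := by
  refine List.Perm.eq_of_pairwise ?_ (pv_sortb_pairwise t) hc ((pv_sortb_perm t).trans hperm)
  intro a b _ _ h1 h2
  omega

theorem pv_pvW_cons (d : Int) (s : List Int) :
    pvW (d :: s) = (if d ≠ 0 then 1 else 0) + (if s = [] ∧ d = 0 then 1 else 0) := by
  have hg : PySem.List.pyGet? (d :: s) 0 = some d := by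
    simp [PySem.List.pyGet?, PySem.List.pyIdx?]
  simp only [pvW, hg, List.length_cons]
  by_cases hd : d = 0 <;> by_cases hs : s = [] <;>
    simp [hd, hs, List.length_eq_zero_iff]

-- ---- one length: sum over sorted combinations of deduplicated permutations = sum over all strings ----
theorem pv_digits_iff (x : Int) : x ∈ pvDigits ↔ 0 ≤ x ∧ x < 10 := PySem.List.mem_pyRange_one

theorem pv_Si (n : Nat) (k : Int) :
    (((pvCWR pvDigits n).filter (fun c => decide (pvCost c = k))).map pvWD).sum = pvN n k := by
  have hdig : pvDigits.Pairwise (· < ·) := by decide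
  have hCmem : ∀ c, c ∈ (pvCWR pvDigits n).filter (fun c => decide (pvCost c = k)) ↔
      (c.length = n ∧ c.Pairwise (· ≤ ·) ∧ (∀ x ∈ c, 0 ≤ x ∧ x < 10)) ∧ pvCost c = k := by
    intro c
    rw [List.mem_filter, pv_mem_pvCWR _ _ _ hdig, decide_eq_true_eq]
    constructor
    · rintro ⟨⟨h1, h2, h3⟩, h4⟩
      exact ⟨⟨h1, h2, fun x hx => (pv_digits_iff x).mp (h3 x hx)⟩, h4⟩
    · rintro ⟨⟨h1, h2, h3⟩, h4⟩
      exact ⟨⟨h1, h2, fun x hx => (pv_digits_iff x).mpr (h3 x hx)⟩, h4⟩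
  have hTmem : ∀ t, t ∈ (pvAll n).filter (fun s => decide (pvCost s = k)) ↔
      (t.length = n ∧ ∀ a ∈ t, 0 ≤ a ∧ a < 10) ∧ pvCost t = k := by
    intro t
    rw [List.mem_filter, pv_mem_pvAll, decide_eq_true_eq]
  -- step a: per combination, the deduplicated permutation set is (as a sum) the fiber of pvSortb
  have hstep : ∀ c ∈ (pvCWR pvDigits n).filter (fun c => decide (pvCost c = k)),
      pvWD c = ((((pvAll n).filter (fun s => decide (pvCost s = k))).filter
        (fun t => pvSortb t == c)).map pvW).sum := by
    intro c hc
    obtain ⟨⟨hlen, hsort, hel⟩, hcost⟩ := (hCmem c).mp hc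
    have hperm : (PySem.Set.ofList (PySem.List.permutations c c.length)).Perm
        (((pvAll n).filter (fun s => decide (pvCost s = k))).filter (fun t => pvSortb t == c)) := by
      rw [List.perm_ext_iff_of_nodup (PySem.Set.nodup_ofList _)
        (((pv_nodup_pvAll n).filter _).filter _)]
      intro t
      rw [PySem.Set.mem_ofList, pv_mem_permutations, List.mem_filter, hTmem, beq_iff_eq]
      constructor
      · intro hp
        refine ⟨⟨⟨hp.length_eq.trans hlen, fun a ha => hel a (hp.mem_iff.mp ha)⟩,
          (pv_cost_perm hp).trans hcost⟩, pv_sortb_eq hp hsort⟩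
      · rintro ⟨_, hs⟩
        have := (pv_sortb_perm t).symm
        rw [hs] at this
        exact this
    exact ((hperm.map pvW).sum_eq)
  rw [List.map_congr_left hstep, pv_part1]
  have hcount : ∀ t ∈ (pvAll n).filter (fun s => decide (pvCost s = k)),
      ((pvCWR pvDigits n).filter (fun c => decide (pvCost c = k))).count (pvSortb t) = 1 := by
    intro t ht
    obtain ⟨⟨hlen, hel⟩, hcost⟩ := (hTmem t).mp ht
    apply List.count_eq_one_of_mem ((pv_nodup_pvCWR _ _ hdig).filter _)
    refine (hCmem (pvSortb t)).mpr ⟨⟨?_, pv_sortb_pairwise t, ?_⟩, ?_⟩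
    · rw [(pv_sortb_perm t).length_eq, hlen]
    · intro x hx; exact hel x ((pv_sortb_perm t).mem_iff.mp hx)
    · rw [pv_cost_perm (pv_sortb_perm t), hcost]
  unfold pvN
  rw [List.map_congr_left (fun t ht => by rw [hcount t ht]; push_cast; rw [one_mul] :
    ∀ t ∈ (pvAll n).filter (fun s => decide (pvCost s = k)),
      ((((pvCWR pvDigits n).filter (fun c => decide (pvCost c = k))).count (pvSortb t) : Int) * pvW t)
        = pvW t)]

-- ---- the A side collapses to sums of pvN ----
theorem pv_solution_eq_sumN (k : Int) :
    solution k = ((List.range 10).map (fun i => pvN i k)).sum := by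
  have hinner : ∀ (l : List (List Int)) (r : Int),
      l.foldl (fun r tup =>
        let r := if PySem.List.pyGet? tup 0 ≠ some 0 then r + 1 else r
        if tup.length = 1 ∧ PySem.List.pyGet? tup 0 = some 0 then r + 1 else r) r
        = r + (l.map pvW).sum := by
    intro l r
    rw [PySem.List.foldl_congr_mem l _ (fun r tup => r + pvW tup) r ?_]
    · exact PySem.List.foldl_add l pvW r
    · intro acc tup _
      simp only [pvW]
      split_ifs <;> ring
  unfold solution
  dsimp only
  rw [PySem.List.foldl_append_eq_flatMap, List.nil_append,
    PySem.List.foldl_append_ite_eq_filter, List.nil_append]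
  rw [PySem.List.foldl_congr_mem _ _ (fun result comb => result + pvWD comb) 0 ?_]
  · rw [PySem.List.foldl_add, List.filter_flatMap, List.map_flatMap, pv_sum_flatMap,
      zero_add]
    have hpy : PySem.List.pyRange 0 10 1 = (List.range 10).map (fun j : Nat => (j : Int)) := by
      decide
    rw [hpy, List.map_map]
    apply congrArg
    apply List.map_congr_left
    intro j _
    show (((pvCWR pvDigits ((j : Int)).toNat).filter _).map pvWD).sum = pvN j k
    rw [Int.toNat_natCast]
    exact pv_Si j k
  · intro acc comb _
    exact hinner _ acc

-- ---- evaluating pvN ----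
theorem pv_pvN_zero (k : Int) : pvN 0 k = if k = 0 then 1 else 0 := by
  by_cases h : k = 0
  · subst h; simp [pvN, pvAll, pvCost, pvW, PySem.List.pyGet?, PySem.List.pyIdx?]
  · simp [pvN, pvAll, pvCost, Ne.symm h]
    exact h

theorem pv_filter_cons_eq (d : Int) (v : Int) (n : Nat) :
    List.filter ((fun s => decide (pvCost s = v)) ∘ (fun t => d :: t)) (pvAll n)
      = (pvAll n).filter (fun s => decide (pvCost s = v - pvStick d)) := by
  apply List.filter_congr
  intro s _
  simp only [Function.comp, pvCost, pvStick, List.map_cons, List.sum_cons, decide_eq_decide]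
  omega

theorem pv_pvN_succ (n : Nat) (k : Int) :
    pvN (n+1) k = (pvDigits.map (fun d =>
      (if d ≠ 0 then pvM n (k - pvStick d) else 0)
        + (if d = 0 ∧ n = 0 ∧ k = 6 then 1 else 0))).sum := by
  simp only [pvN, pvAll]
  rw [List.filter_flatMap, List.map_flatMap, pv_sum_flatMap]
  apply congrArg
  apply List.map_congr_left
  intro d _
  rw [List.filter_map, List.map_map, pv_filter_cons_eq]
  simp only [Function.comp_def]
  rw [List.map_congr_left (fun s _ => pv_pvW_cons d s :
    ∀ s ∈ (pvAll n).filter (fun s => decide (pvCost s = k - pvStick d)),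
      pvW (d :: s)
        = (if d ≠ 0 then (1:Int) else 0) + (if s = [] ∧ d = 0 then 1 else 0))]
  rw [PySem.List.sum_map_add_int]
  congr 1
  · rw [PySem.List.sum_map_const_int]
    by_cases hd0 : d = 0
    · simp [hd0]
    · simp only [hd0, ne_eq, not_false_eq_true, if_true, mul_one, pvM]
  · by_cases hd0 : d = 0
    · subst hd0
      cases n with
      | zero =>
        have h6 : pvStick 0 = 6 := by decide
        by_cases hk : k = 6
        · subst hk
          decide
        · have hnil : List.filter (fun s => decide (pvCost s = k - pvStick 0)) [[]] = [] := by
            have : (decide (pvCost [] = k - pvStick 0)) = false := by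
              simp only [pvCost, List.map_nil, List.sum_nil, h6]
              simp only [decide_eq_false_iff_not]
              omega
            simp [List.filter, this]
          rw [show pvAll 0 = [[]] from rfl, hnil]
          simp [hk]
      | succ m =>
        rw [List.map_congr_left (g := fun _ => (0:Int)) ?_]
        · simp
        · intro s hs
          have hsm : s ∈ pvAll (m+1) := List.mem_of_mem_filter hs
          have hlen := ((pv_mem_pvAll _ s).mp hsm).1
          have hne : s ≠ [] := by
            intro he; subst he; simp at hlen
          simp [hne]
    · rw [List.map_congr_left (g := fun _ => (0:Int)) ?_]
      · simp [hd0]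
      · intro s _
        simp [hd0]

theorem pv_pvM_succ (n : Nat) (c : Int) :
    pvM (n+1) c = (pvDigits.map (fun d => pvM n (c - pvStick d))).sum := by
  simp only [pvM, pvAll]
  rw [List.filter_flatMap, List.length_flatMap, Nat.cast_list_sum, List.map_map]
  apply congrArg
  apply List.map_congr_left
  intro d _
  simp only [Function.comp]
  rw [List.filter_map, List.length_map, pv_filter_cons_eq]

theorem pv_pvM_neg (n : Nat) (c : Int) (hc : c < 0) : pvM n c = 0 := by
  simp only [pvM]
  rw [List.filter_eq_nil_iff.mpr ?_]
  · rfl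
  · intro s hs
    simp only [decide_eq_true_eq]
    intro he
    have := (pv_cost_bounds n s hs).1
    omega

-- the common closed form both programs reach
def pvE (k : Int) : Int :=
  ((List.range 9).map (fun n =>
    ((PySem.List.pyRange 1 10 1).map (fun d => pvM n (k - pvStick d))).sum)).sum
    + (if k = 6 then 1 else 0)

theorem pv_A_eq_E (k : Int) (hk : k ≠ 0) : solution k = pvE k := by
  rw [pv_solution_eq_sumN, List.range_succ_eq_map, List.map_cons, List.sum_cons,
    List.map_map, pv_pvN_zero, if_neg hk, zero_add]
  have hrow : ∀ n : Nat, pvN (n+1) k =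
      ((PySem.List.pyRange 1 10 1).map (fun d => pvM n (k - pvStick d))).sum
        + (if n = 0 ∧ k = 6 then 1 else 0) := by
    intro n
    rw [pv_pvN_succ]
    have hsplit : pvDigits = 0 :: PySem.List.pyRange 1 10 1 := by decide
    rw [hsplit, List.map_cons, List.sum_cons, PySem.List.sum_map_add_int]
    have h1 : ((PySem.List.pyRange 1 10 1).map (fun d => if d ≠ 0 then pvM n (k - pvStick d) else 0))
        = (PySem.List.pyRange 1 10 1).map (fun d => pvM n (k - pvStick d)) := by
      apply List.map_congr_left
      intro d hd
      have := PySem.List.mem_pyRange_one.mp hd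
      simp only [ne_eq, if_pos (by omega : ¬ d = 0)]
    have h2 : ((PySem.List.pyRange 1 10 1).map (fun d => if d = 0 ∧ n = 0 ∧ k = 6 then (1:Int) else 0))
        = (PySem.List.pyRange 1 10 1).map (fun _ => (0:Int)) := by
      apply List.map_congr_left
      intro d hd
      have := PySem.List.mem_pyRange_one.mp hd
      simp only [if_neg (by omega : ¬ (d = 0 ∧ n = 0 ∧ k = 6))]
    rw [h1, h2]
    simp only [ne_eq, not_true_eq_false, if_false, PySem.List.sum_map_const_int, mul_zero]
    by_cases h : n = 0 ∧ k = 6 <;> simp [h] <;> ring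
  have h5 : List.map ((fun i => pvN i k) ∘ Nat.succ) (List.range 9)
      = List.map (fun n => ((PySem.List.pyRange 1 10 1).map (fun d => pvM n (k - pvStick d))).sum
          + (if n = 0 ∧ k = 6 then (1:Int) else 0)) (List.range 9) := by
    apply List.map_congr_left
    intro n _
    simp only [Function.comp]
    exact hrow n
  rw [h5, PySem.List.sum_map_add_int]
  unfold pvE
  congr 1
  rw [List.range_succ_eq_map, List.map_cons, List.sum_cons, List.map_map]
  have h4 : ((List.range 8).map ((fun n => if n = 0 ∧ k = 6 then (1:Int) else 0) ∘ Nat.succ))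
      = (List.range 8).map (fun _ => (0:Int)) := by
    apply List.map_congr_left
    intro j _
    simp [Function.comp]
  rw [h4]
  simp

-- ---- the B side ----
theorem pv_pvM_high (n : Nat) (c : Int) (hc : 7 * (n : Int) < c) : pvM n c = 0 := by
  simp only [pvM]
  rw [List.filter_eq_nil_iff.mpr ?_]
  · rfl
  · intro s hs
    simp only [decide_eq_true_eq]
    intro he
    have := (pv_cost_bounds n s hs).2
    omega

theorem pv_sticksB_eq : pvSticksB = pvDigits.map pvStick := by decide

theorem pv_sticksB_bounds : ∀ s ∈ pvSticksB, 2 ≤ s ∧ s ≤ 7 := by decide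

theorem pv_row_ok (n : Nat) :
    pvStep^[n] (1 :: List.replicate 63 0) = (List.range 64).map (fun c : Nat => pvM n (c : Int)) := by
  induction n with
  | zero =>
    simp only [Function.iterate_zero, id]
    decide
  | succ n ih =>
    rw [Function.iterate_succ_apply', ih]
    unfold pvStep
    apply List.map_congr_left
    intro c hc
    have hc64 : c < 64 := by simpa using hc
    rw [pv_sum_filterMap _ (fun s => 0 ≤ (c : Int) - s)]
    have hterm : ∀ s ∈ pvSticksB,
        (if 0 ≤ (c : Int) - s then ((List.range 64).map (fun j : Nat => pvM n (j : Int))).getD ((c : Int) - s).toNat 0 else 0)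
          = pvM n ((c : Int) - s) := by
      intro s hs
      obtain ⟨hs2, hs7⟩ := pv_sticksB_bounds s hs
      by_cases hpos : 0 ≤ (c : Int) - s
      · rw [if_pos hpos]
        have hlt : ((c : Int) - s).toNat < 64 := by omega
        rw [PySem.List.getD_map_range _ _ _ _ hlt]
        congr 1
        omega
      · rw [if_neg hpos, pv_pvM_neg n _ (by omega)]
    rw [List.map_congr_left hterm, pv_pvM_succ, pv_sticksB_eq, List.map_map]
    rfl

theorem pv_fold_rows (m : Nat) (rows0 : List (List Int)) (g : List Int) :
    (List.range m).foldl (fun (st : List (List Int) × List Int) _ => (st.1 ++ [st.2], pvStep st.2)) (rows0, g)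
      = (rows0 ++ (List.range m).map (fun j => pvStep^[j] g), pvStep^[m] g) := by
  induction m with
  | zero => simp
  | succ m ih =>
    rw [List.range_succ, List.foldl_append, ih]
    simp only [List.foldl_cons, List.foldl_nil, List.map_append, List.map_cons, List.map_nil]
    rw [Function.iterate_succ_apply']
    simp [List.append_assoc]

theorem pv_stickB_getD (d : Int) (h1 : 1 ≤ d) (h2 : d < 10) :
    pvSticksB.getD d.toNat 0 = pvStick d := by
  interval_cases d <;> decide

theorem pv_B_eq_E (k : Int) (h2 : 2 ≤ k) (h63 : k ≤ 63) : solution_alt k = pvE k := by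
  unfold solution_alt
  rw [if_neg (by omega)]
  dsimp only
  rw [pv_fold_rows 9 [] _, List.nil_append, List.map_map]
  unfold pvE
  congr 1
  apply congrArg
  apply List.map_congr_left
  intro j _
  simp only [Function.comp_def]
  rw [pv_row_ok j]
  have hopt : ∀ d ∈ PySem.List.pyRange 1 10 1,
      (if 0 ≤ k - pvSticksB.getD d.toNat 0 then
          some (((List.range 64).map (fun c : Nat => pvM j (c : Int))).getD (k - pvSticksB.getD d.toNat 0).toNat 0)
        else none)
        = if 0 ≤ k - pvStick d then some (pvM j (k - pvStick d)) else none := by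
    intro d hd
    have hd' := PySem.List.mem_pyRange_one.mp hd
    rw [pv_stickB_getD d hd'.1 hd'.2]
    by_cases hpos : 0 ≤ k - pvStick d
    · rw [if_pos hpos, if_pos hpos]
      have hb := pv_stick_bounds d (by omega) hd'.2
      have hlt : (k - pvStick d).toNat < 64 := by omega
      rw [PySem.List.getD_map_range _ _ _ _ hlt]
      congr 2
      omega
    · rw [if_neg hpos, if_neg hpos]
  rw [List.filterMap_congr hopt, pv_sum_filterMap _ (fun d => 0 ≤ k - pvStick d)]
  apply congrArg
  apply List.map_congr_left
  intro d hd
  have hd' := PySem.List.mem_pyRange_one.mp hd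
  by_cases hpos : 0 ≤ k - pvStick d
  · rw [if_pos hpos]
  · rw [if_neg hpos, pv_pvM_neg j _ (by omega)]

theorem pv_E_out (k : Int) (hk : k ≠ 0) (hout : k < 2 ∨ 63 < k) : pvE k = 0 := by
  unfold pvE
  have hk6 : ¬ k = 6 := by omega
  rw [if_neg hk6, add_zero]
  rw [List.map_congr_left (g := fun _ => (0:Int)) ?_]
  · simp
  · intro n hn
    have hn9 : n < 9 := List.mem_range.mp hn
    rw [List.map_congr_left (g := fun _ => (0:Int)) ?_]
    · simp
    · intro d hd
      have hd' := PySem.List.mem_pyRange_one.mp hd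
      have hb := pv_stick_bounds d (by omega) hd'.2
      rcases hout with h | h
      · exact pv_pvM_neg n _ (by omega)
      · exact pv_pvM_high n _ (by push_cast; omega)

-- ===== VERDICT (by name: the statement is the Claim_ definition above) =====
theorem solution_spec : Claim_equal_solution := by
  intro k _ hk
  unfold Spec_solution
  by_cases hr : k < 2 ∨ 63 < k
  · rw [pv_A_eq_E k hk, pv_E_out k hk hr]
    unfold solution_alt
    rw [if_pos hr]
  · push Not at hr
    rw [pv_A_eq_E k hk, ← pv_B_eq_E k hr.1 hr.2]
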